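-- pv_equiv track=rewrite | github.com/PlanetXtreme/PKGImportExport | io_scene_pkg/import_helper.py | convert_triangle_strips
-- ===== SOURCE A (Python) =====
-- def check_degenerate(i1, i2, i3):
--     if i1 == i2 or i1 == i3 or i2 == i3:
--         return True
--     return False
--
-- def triangle_strip_to_list(strip, clockwise):
--     """convert a strip of triangles into a list of triangles"""
--     triangle_list = []
--     for v in range(len(strip) - 2):
--         if clockwise:
--             triangle_list.extend([strip[v+1], strip[v], strip[v+2]])
--         else:
--             triangle_list.extend([strip[v], strip[v+1], strip[v+2]])
--
--         # make sure we aren't resetting the clockwise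
--         # flag if we have a degenerate triangle
--         if not check_degenerate(strip[v], strip[v+1], strip[v+2]):
--             clockwise = not clockwise
--
--     return triangle_list
--
-- def convert_triangle_strips(tristrip_data):
--     """convert Midnight Club triangle strips into triangle list data"""
--     last_strip_cw = False
--     last_strip_indices = []
--     trilist_data = []
--     for us in tristrip_data:
--         # flags processing
--         FLAG_CW = ((us & (1 << 14)) != 0)
--         FLAG_END = ((us & (1 << 15)) != 0)
--         INDEX = us
--         if FLAG_CW:
--             INDEX &= ~(1 << 14)
--         if FLAG_END:
--             INDEX &= ~(1 << 15)
--
--         # cw flag is only set at the first index in the strip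
--         if len(last_strip_indices) == 0:
--             last_strip_cw = FLAG_CW
--         last_strip_indices.append(INDEX)
--
--         # are we done with this strip?
--         if FLAG_END:
--             trilist_data.extend(triangle_strip_to_list(last_strip_indices, last_strip_cw))
--             last_strip_cw = False
--             last_strip_indices = []
--
--     return trilist_data
-- ===== SOURCE B (Python) =====
-- MASK = ~0xC000
--
-- def _parity_decode(strip, cw0):
--     """decode one masked strip; triangle v winds clockwise iff cw0 plus the
--     count of non-degenerate triangles before v is odd (prefix-sum parity)"""
--     flips = [0]
--     for v in range(len(strip) - 2):
--         flips.append(flips[-1] + (len({strip[v], strip[v + 1], strip[v + 2]}) == 3))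
--     return [i
--             for v in range(len(strip) - 2)
--             for i in ([strip[v + 1], strip[v], strip[v + 2]]
--                       if (cw0 + flips[v]) % 2 else
--                       [strip[v], strip[v + 1], strip[v + 2]])]
--
-- def convert_triangle_strips(tristrip_data):
--     """convert Midnight Club triangle strips into triangle list data"""
--     # strip boundaries up front: END-flagged positions close strips, each strip
--     # starts right after the previous END (a trailing strip with no END is
--     # dropped by the zip); winding is derived arithmetically, not by toggling
--     ends = [i for i, u in enumerate(tristrip_data) if u & 0x8000]
--     starts = [0] + [e + 1 for e in ends[:-1]]
--     out = []
--     for s, e in zip(starts, ends):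
--         cw0 = 1 if tristrip_data[s] & 0x4000 else 0
--         strip = [u & MASK for u in tristrip_data[s:e + 1]]
--         out += _parity_decode(strip, cw0)
--     return out
-- ===== Notes on version B (the rewrite author's own statement) =====
-- stated objective: alternative
-- what changed: Replaces A's single interleaved scan (incremental strip accumulation, conditional per-flag bit clearing, boolean winding toggle) by a positional computation: strip boundary index lists (ends/starts) are computed up front, each strip is extracted by slicing and masked in one comprehension, and every triangle's winding is derived arithmetically as the parity of a prefix count of non-degenerate triangles (set-cardinality test) instead of a toggled flag.
import Mathlib
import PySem

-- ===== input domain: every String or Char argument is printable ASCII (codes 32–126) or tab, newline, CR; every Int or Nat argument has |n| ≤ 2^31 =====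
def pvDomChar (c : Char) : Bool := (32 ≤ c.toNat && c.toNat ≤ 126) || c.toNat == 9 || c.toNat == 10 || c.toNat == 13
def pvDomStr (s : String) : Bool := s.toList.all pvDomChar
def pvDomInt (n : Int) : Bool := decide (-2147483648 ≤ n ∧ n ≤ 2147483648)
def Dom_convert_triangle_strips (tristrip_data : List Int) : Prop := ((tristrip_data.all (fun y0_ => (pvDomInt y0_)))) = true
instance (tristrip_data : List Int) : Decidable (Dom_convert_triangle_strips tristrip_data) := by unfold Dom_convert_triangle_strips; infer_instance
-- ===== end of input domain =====

-- B recomputes the same triangle list positionally: strip boundaries (ends/starts) first,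
-- strips by slicing, winding by parity of a prefix count of non-degenerate triangles.

-- ===== PORT A =====
def check_degenerate (i1 : Int) (i2 : Int) (i3 : Int) : Bool :=
  if i1 == i2 || i1 == i3 || i2 == i3 then true else false

-- strip[v], strip[v+1], strip[v+2] are always in range (v < len - 2), so List.getD is exact here
def triangle_strip_to_list (strip : List Int) (clockwise : Bool) : List Int :=
  ((List.range (strip.length - 2)).foldl
    (fun (st : List Int × Bool) v =>
      (st.1 ++ (if st.2 then [strip.getD (v+1) 0, strip.getD v 0, strip.getD (v+2) 0]
                else [strip.getD v 0, strip.getD (v+1) 0, strip.getD (v+2) 0]),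
       if !(check_degenerate (strip.getD v 0) (strip.getD (v+1) 0) (strip.getD (v+2) 0))
       then !st.2 else st.2))
    ([], clockwise)).1

def convert_triangle_strips (tristrip_data : List Int) : List Int :=
  (tristrip_data.foldl
    (fun (st : Bool × List Int × List Int) us =>
      let FLAG_CW : Bool := PySem.Int.band us ((1:Int) <<< (14:Nat)) != 0
      let FLAG_END : Bool := PySem.Int.band us ((1:Int) <<< (15:Nat)) != 0
      let INDEX1 : Int := if FLAG_CW then PySem.Int.band us (Int.not ((1:Int) <<< (14:Nat))) else us
      let INDEX2 : Int := if FLAG_END then PySem.Int.band INDEX1 (Int.not ((1:Int) <<< (15:Nat))) else INDEX1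
      let last_strip_cw : Bool := if st.2.1.length == 0 then FLAG_CW else st.1
      let last_strip_indices : List Int := st.2.1 ++ [INDEX2]
      if FLAG_END then
        (false, ([] : List Int), st.2.2 ++ triangle_strip_to_list last_strip_indices last_strip_cw)
      else
        (last_strip_cw, last_strip_indices, st.2.2))
    (false, ([] : List Int), ([] : List Int))).2.2

-- ===== PORT B =====
def pvMask : Int := Int.not 49152   -- MASK = ~0xC000

-- strip[v+i] is always in range (v < len - 2) and flips[v] has v < len(flips), so getD is exact;
-- flips[-1] reads the last element of a list that always has one (it starts as [0]): getLastD
def pvParityDecode (strip : List Int) (cw0 : Int) : List Int :=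
  let flips := (List.range (strip.length - 2)).foldl
      (fun (fl : List Int) v =>
        fl ++ [fl.getLastD 0 +
          (if (PySem.Set.ofList [strip.getD v 0, strip.getD (v+1) 0, strip.getD (v+2) 0]).length == 3
           then (1:Int) else 0)])
      [0]
  (List.range (strip.length - 2)).flatMap
    (fun v => if PySem.Int.mod (cw0 + flips.getD v 0) 2 != 0
              then [strip.getD (v+1) 0, strip.getD v 0, strip.getD (v+2) 0]
              else [strip.getD v 0, strip.getD (v+1) 0, strip.getD (v+2) 0])

-- tristrip_data[s] is always in range (s is a strip start ≤ an END index), so pyGetD is exact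
def convert_triangle_strips_alt (tristrip_data : List Int) : List Int :=
  let ends := ((PySem.List.enumerate tristrip_data).filter
      (fun p => PySem.Int.band p.2 32768 != 0)).map (·.1)
  let starts := 0 :: (ends.dropLast).map (· + 1)
  (starts.zip ends).foldl
    (fun out se =>
      let cw0 : Int := if PySem.Int.band (PySem.List.pyGetD tristrip_data se.1 0) 16384 != 0 then 1 else 0
      let strip := (PySem.List.slice tristrip_data (some se.1) (some (se.2 + 1))).map
          (fun u => PySem.Int.band u pvMask)
      out ++ pvParityDecode strip cw0) []

-- ===== PRECONDITION & SPEC =====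
def Spec_convert_triangle_strips (tristrip_data : List Int) (out : List Int) : Prop := out = convert_triangle_strips_alt tristrip_data
instance (tristrip_data : List Int) (out : List Int) : Decidable (Spec_convert_triangle_strips tristrip_data out) := by unfold Spec_convert_triangle_strips; infer_instance

-- ===== CLAIM (what is proved, stated in full; the proofs are below) =====
def Claim_equal_convert_triangle_strips : Prop := ∀ (tristrip_data : List Int), Dom_convert_triangle_strips tristrip_data → Spec_convert_triangle_strips tristrip_data (convert_triangle_strips tristrip_data)

-- ===== LEMMAS AND PROOFS =====

-- ---- proof-only helper definitions ----

-- A's loop body, named (definitionally the lambda inside convert_triangle_strips)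
def pvAStep (st : Bool × List Int × List Int) (us : Int) : Bool × List Int × List Int :=
  let FLAG_CW : Bool := PySem.Int.band us ((1:Int) <<< (14:Nat)) != 0
  let FLAG_END : Bool := PySem.Int.band us ((1:Int) <<< (15:Nat)) != 0
  let INDEX1 : Int := if FLAG_CW then PySem.Int.band us (Int.not ((1:Int) <<< (14:Nat))) else us
  let INDEX2 : Int := if FLAG_END then PySem.Int.band INDEX1 (Int.not ((1:Int) <<< (15:Nat))) else INDEX1
  let last_strip_cw : Bool := if st.2.1.length == 0 then FLAG_CW else st.1
  let last_strip_indices : List Int := st.2.1 ++ [INDEX2]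
  if FLAG_END then
    (false, ([] : List Int), st.2.2 ++ triangle_strip_to_list last_strip_indices last_strip_cw)
  else
    (last_strip_cw, last_strip_indices, st.2.2)

def pvMaskF (u : Int) : Int := PySem.Int.band u pvMask

-- winding flag of a strip whose raw elements are `pre` (default cw if pre is empty)
def pvCW0 (pre : List Int) (cw : Bool) : Bool :=
  match pre with
  | [] => cw
  | u :: _ => PySem.Int.band u 16384 != 0

def pvNd (a b c : Int) : Int :=
  if (PySem.Set.ofList [a, b, c]).length == 3 then (1:Int) else 0

def pvNdSum (strip : List Int) : Nat → Int
  | 0 => 0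
  | v + 1 => pvNdSum strip v + pvNd (strip.getD v 0) (strip.getD (v+1) 0) (strip.getD (v+2) 0)

def pvEnds (data : List Int) : List Int :=
  ((PySem.List.enumerate data).filter (fun p => PySem.Int.band p.2 32768 != 0)).map (·.1)

def pvStarts (data : List Int) : List Int := 0 :: (pvEnds data).dropLast.map (· + 1)

def pvDec (data : List Int) (se : Int × Int) : List Int :=
  pvParityDecode ((PySem.List.slice data (some se.1) (some (se.2 + 1))).map (fun u => PySem.Int.band u pvMask))
    (if PySem.Int.band (PySem.List.pyGetD data se.1 0) 16384 != 0 then 1 else 0)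

-- ---- integer bit lemmas ----

lemma pv_or_add_and : ∀ (m : Nat), ∀ c, (m ||| c) + (m &&& c) = m + c := by
  intro m
  induction m using Nat.strong_induction_on with
  | _ m ih =>
    intro c
    rcases Nat.eq_zero_or_pos m with rfl | hm
    · simp
    have hlt : m / 2 < m := Nat.div_lt_self hm (by omega)
    have h1 := ih (m / 2) hlt (c / 2)
    rw [← Nat.or_div_two, ← Nat.and_div_two] at h1
    have hom : (m ||| c) % 2 = (m % 2) ||| (c % 2) := by
      simpa using Nat.or_mod_two_pow (a := m) (b := c) (n := 1)
    have ham : (m &&& c) % 2 = (m % 2) &&& (c % 2) := by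
      simpa using Nat.and_mod_two_pow (a := m) (b := c) (n := 1)
    rcases Nat.mod_two_eq_zero_or_one m with h2 | h2 <;>
      rcases Nat.mod_two_eq_zero_or_one c with h3 | h3
    · have ho : (m ||| c) % 2 = 0 := by rw [hom, h2, h3]; decide
      have ha : (m &&& c) % 2 = 0 := by rw [ham, h2, h3]; decide
      omega
    · have ho : (m ||| c) % 2 = 1 := by rw [hom, h2, h3]; decide
      have ha : (m &&& c) % 2 = 0 := by rw [ham, h2, h3]; decide
      omega
    · have ho : (m ||| c) % 2 = 1 := by rw [hom, h2, h3]; decide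
      have ha : (m &&& c) % 2 = 0 := by rw [ham, h2, h3]; decide
      omega
    · have ho : (m ||| c) % 2 = 1 := by rw [hom, h2, h3]; decide
      have ha : (m &&& c) % 2 = 1 := by rw [ham, h2, h3]; decide
      omega

lemma pv_tb14 (n : Nat) : n &&& 16384 = 16384 * (n / 16384 % 2) := by
  have h := Nat.and_two_pow n 14
  norm_num at h
  rw [h, Nat.testBit_eq_decide_div_mod_eq]
  norm_num
  by_cases hx : n / 16384 % 2 = 1
  · simp [hx]
  · simp [hx]; omega

lemma pv_tb15 (n : Nat) : n &&& 32768 = 32768 * (n / 32768 % 2) := by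
  have h := Nat.and_two_pow n 15
  norm_num at h
  rw [h, Nat.testBit_eq_decide_div_mod_eq]
  norm_num
  by_cases hx : n / 32768 % 2 = 1
  · simp [hx]
  · simp [hx]; omega

lemma pv_tb1415 (n : Nat) : n &&& 49152 = 16384 * (n / 16384 % 2) + 32768 * (n / 32768 % 2) := by
  have e : (49152 : Nat) = 16384 ||| 32768 := by decide
  rw [e, Nat.and_or_distrib_left, pv_tb14, pv_tb15]
  have hx : n / 16384 % 2 = 0 ∨ n / 16384 % 2 = 1 := by omega
  have hy : n / 32768 % 2 = 0 ∨ n / 32768 % 2 = 1 := by omega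
  rcases hx with hx | hx <;> rcases hy with hy | hy <;> rw [hx, hy] <;> decide

lemma pv_band_pos_lit (a : Int) (ha : 0 ≤ a) (c : Nat) :
    PySem.Int.band a (c : Int) = ((a.toNat &&& c : Nat) : Int) := by
  rw [PySem.Int.band_of_nonneg ha (by positivity)]
  simp

lemma pv_band_neg_lit (a : Int) (ha : a < 0) (c : Nat) :
    PySem.Int.band a (c : Int) = (c : Int) - ((c &&& (-a - 1).toNat : Nat) : Int) := by
  simp only [PySem.Int.band]
  rw [if_neg (by omega), if_pos (by positivity)]
  simp only [Int.toNat_natCast]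
  have h : c &&& (-a - 1).toNat ≤ c := Nat.and_le_left
  push_cast [h]
  ring

-- a & ~c = a - (a & c)  (nonneg mask c: how A's conditional bit clearing meets B's one-shot mask)
lemma pv_band_not_sub (a c : Int) (hc : 0 ≤ c) :
    PySem.Int.band a (Int.not c) = a - PySem.Int.band a c := by
  obtain ⟨n, rfl⟩ := Int.eq_ofNat_of_zero_le hc
  have hnot : Int.not (n : Int) = -(n : Int) - 1 := by
    simp [Int.not]; omega
  have e : -(-(n:Int) - 1) - 1 = (n : Int) := by ring
  simp only [PySem.Int.band, hnot]
  split_ifs with h1 h2 h3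
  · omega
  · rw [e]
    simp only [Int.toNat_natCast]
    have h3 : a.toNat &&& n ≤ a.toNat := Nat.and_le_left
    have h4 : (a.toNat : Int) = a := Int.toNat_of_nonneg h1
    push_cast [h3]
    omega
  · omega
  · rw [e]
    simp only [Int.toNat_natCast]
    set m := (-a - 1).toNat with hmdef
    have hma : ((m : Nat) : Int) = -a - 1 := Int.toNat_of_nonneg (by omega)
    have key := pv_or_add_and m n
    have h4 : n &&& m ≤ n := Nat.and_le_left
    have h5 : m &&& n = n &&& m := Nat.and_comm m n
    have h6 : n &&& m ≤ m := Nat.and_le_right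
    push_cast [h4]
    push_cast [h5] at key
    omega

-- bits 14 and 15 are independent: a & 49152 splits
lemma pv_band_split (a : Int) :
    PySem.Int.band a 49152 = PySem.Int.band a 16384 + PySem.Int.band a 32768 := by
  have c1 : ((16384:Nat) : Int) = (16384 : Int) := by norm_num
  have c2 : ((32768:Nat) : Int) = (32768 : Int) := by norm_num
  have c3 : ((49152:Nat) : Int) = (49152 : Int) := by norm_num
  rcases (by omega : 0 ≤ a ∨ a < 0) with ha | ha
  · rw [← c1, ← c2, ← c3, pv_band_pos_lit a ha, pv_band_pos_lit a ha, pv_band_pos_lit a ha]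
    rw [pv_tb14, pv_tb15, pv_tb1415]
    push_cast
    ring
  · rw [← c1, ← c2, ← c3, pv_band_neg_lit a ha, pv_band_neg_lit a ha, pv_band_neg_lit a ha]
    set m := (-a - 1).toNat
    have e14 : (16384:Nat) &&& m = m &&& 16384 := Nat.and_comm _ _
    have e15 : (32768:Nat) &&& m = m &&& 32768 := Nat.and_comm _ _
    have e49 : (49152:Nat) &&& m = m &&& 49152 := Nat.and_comm _ _
    rw [e14, e15, e49, pv_tb14, pv_tb15, pv_tb1415]
    have hx : m / 16384 % 2 ≤ 1 := by omega
    have hy : m / 32768 % 2 ≤ 1 := by omega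
    push_cast
    omega

-- clearing bit 14 leaves bit 15 untouched
lemma pv_cross (a : Int) :
    PySem.Int.band (a - PySem.Int.band a 16384) 32768 = PySem.Int.band a 32768 := by
  have c1 : ((16384:Nat) : Int) = (16384 : Int) := by norm_num
  have c2 : ((32768:Nat) : Int) = (32768 : Int) := by norm_num
  rcases (by omega : 0 ≤ a ∨ a < 0) with ha | ha
  · set n := a.toNat with hn
    have hna : (n : Int) = a := Int.toNat_of_nonneg ha
    have hX : PySem.Int.band a 16384 = ((16384 * (n / 16384 % 2) : Nat) : Int) := by
      rw [← c1, pv_band_pos_lit a ha, pv_tb14]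
    have hx : n / 16384 % 2 = 0 ∨ n / 16384 % 2 = 1 := by omega
    rcases hx with hx | hx
    · rw [hX, hx]
      norm_num
    · rw [hX, hx]
      have hX16 : ((16384 * 1 : Nat) : Int) = 16384 := by norm_num
      rw [hX16]
      have hyn : 0 ≤ a - 16384 := by omega
      rw [← c2, pv_band_pos_lit _ hyn, pv_band_pos_lit a ha]
      have ht : (a - 16384).toNat = n - 16384 := by omega
      rw [ht, pv_tb15, pv_tb15]
      have : (n - 16384) / 32768 % 2 = n / 32768 % 2 := by omega
      rw [this]
  · set m := (-a - 1).toNat with hm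
    have hma : (m : Int) = -a - 1 := Int.toNat_of_nonneg (by omega)
    have e14 : (16384:Nat) &&& m = m &&& 16384 := Nat.and_comm _ _
    have hX : PySem.Int.band a 16384 = 16384 - ((16384 * (m / 16384 % 2) : Nat) : Int) := by
      rw [← c1, pv_band_neg_lit a ha, ← hm, e14, pv_tb14, c1]
    have hx : m / 16384 % 2 = 0 ∨ m / 16384 % 2 = 1 := by omega
    rcases hx with hx | hx
    · rw [hX, hx]
      have h0 : (16384:Int) - ((16384 * 0 : Nat) : Int) = 16384 := by norm_num
      rw [h0]
      rw [← c2, pv_band_neg_lit (a - 16384) (by omega), pv_band_neg_lit a ha, ← hm]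
      have hmt : (-(a - 16384) - 1).toNat = m + 16384 := by omega
      rw [hmt]
      have e15a : (32768:Nat) &&& (m + 16384) = (m + 16384) &&& 32768 := Nat.and_comm _ _
      have e15b : (32768:Nat) &&& m = m &&& 32768 := Nat.and_comm _ _
      rw [e15a, e15b, pv_tb15, pv_tb15]
      have : (m + 16384) / 32768 % 2 = m / 32768 % 2 := by omega
      rw [this]
    · rw [hX, hx]
      have h0 : a - ((16384:Int) - ((16384 * 1 : Nat) : Int)) = a := by push_cast; ring
      rw [h0]

lemma pv_l14 : ((1:Int) <<< (14:Nat)) = 16384 := by decide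
lemma pv_l15 : ((1:Int) <<< (15:Nat)) = 32768 := by decide

-- A's masking of a non-END element equals B's one-shot mask
lemma pv_index_noend (us : Int) (h : PySem.Int.band us 32768 = 0) :
    (if (PySem.Int.band us ((1:Int) <<< (14:Nat)) != 0)
     then PySem.Int.band us (Int.not ((1:Int) <<< (14:Nat))) else us)
    = PySem.Int.band us pvMask := by
  have hM : pvMask = Int.not 49152 := rfl
  rw [pv_l14, hM, pv_band_not_sub us 16384 (by norm_num), pv_band_not_sub us 49152 (by norm_num),
      pv_band_split us, h]
  by_cases h14 : PySem.Int.band us 16384 = 0 <;> simp [h14, bne_iff_ne] <;> omega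

-- A's masking of an END element equals B's one-shot mask
lemma pv_index_end (us : Int) :
    PySem.Int.band
      (if (PySem.Int.band us ((1:Int) <<< (14:Nat)) != 0)
       then PySem.Int.band us (Int.not ((1:Int) <<< (14:Nat))) else us)
      (Int.not ((1:Int) <<< (15:Nat)))
    = PySem.Int.band us pvMask := by
  have hM : pvMask = Int.not 49152 := rfl
  rw [pv_l14, pv_l15, hM]
  rw [show (PySem.Int.band
        (if (PySem.Int.band us (16384:Int) != 0) = true then PySem.Int.band us (Int.not 16384) else us)
        (Int.not 32768))
      = (if (PySem.Int.band us (16384:Int) != 0) = true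
         then PySem.Int.band (PySem.Int.band us (Int.not 16384)) (Int.not 32768)
         else PySem.Int.band us (Int.not 32768))
      from apply_ite (fun x => PySem.Int.band x (Int.not 32768)) _ _ _]
  rw [pv_band_not_sub us 16384 (by norm_num), pv_band_not_sub _ 32768 (by norm_num),
      pv_band_not_sub us 32768 (by norm_num), pv_band_not_sub us 49152 (by norm_num),
      pv_cross us, pv_band_split us]
  by_cases h14 : PySem.Int.band us 16384 = 0 <;> simp [h14, bne_iff_ne] <;> omega

-- ---- A-side loop lemmas ----

lemma pv_A_eq (data : List Int) :
    convert_triangle_strips data = (data.foldl pvAStep (false, [], [])).2.2 := rfl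

-- generic accumulator extraction for the strip-decoding fold
lemma pv_fold_fst_acc (l : List Nat) (g : Nat → Bool → List Int) (h : Nat → Bool → Bool) :
    ∀ (acc : List Int) (cw : Bool),
    l.foldl (fun (st : List Int × Bool) v => (st.1 ++ g v st.2, h v st.2)) (acc, cw)
    = (acc ++ (l.foldl (fun (st : List Int × Bool) v => (st.1 ++ g v st.2, h v st.2)) ([], cw)).1,
       (l.foldl (fun (st : List Int × Bool) v => (st.1 ++ g v st.2, h v st.2)) ([], cw)).2) := by
  induction l with
  | nil => intro acc cw; simp
  | cons a l ih =>
    intro acc cw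
    simp only [List.foldl_cons]
    rw [ih (acc ++ g a cw) (h a cw), ih (([]:List Int) ++ g a cw) (h a cw)]
    simp

-- one step of A's strip decode
lemma pv_tsl_cons (a b c : Int) (t : List Int) (cw : Bool) :
    triangle_strip_to_list (a :: b :: c :: t) cw
    = (if cw then [b, a, c] else [a, b, c])
      ++ triangle_strip_to_list (b :: c :: t) (if !check_degenerate a b c then !cw else cw) := by
  unfold triangle_strip_to_list
  have hlen3 : (a :: b :: c :: t).length - 2 = t.length + 1 := by simp
  have hlen2 : t.length = (b :: c :: t).length - 2 := by simp
  rw [hlen3, List.range_succ_eq_map]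
  simp only [List.foldl_cons, List.foldl_map]
  have g1 : ∀ (y : Nat), (a :: b :: c :: t).getD (y+1) 0 = (b :: c :: t).getD y 0 := by
    intro y; rw [List.getD_cons_succ]
  have g2 : ∀ (y : Nat), (a :: b :: c :: t).getD (y+1+2) 0 = (b :: c :: t).getD (y+2) 0 := by
    intro y
    have e : y+1+2 = (y+2)+1 := by omega
    rw [e, List.getD_cons_succ]
  have g0 : (a :: b :: c :: t).getD 0 0 = a := by simp
  have g4 : (a :: b :: c :: t).getD (0+1) 0 = b := by simp
  have g5 : (a :: b :: c :: t).getD (0+2) 0 = c := by simp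
  simp only [Nat.succ_eq_add_one, g2, g4, g5, g1, g0]
  rw [hlen2]
  rw [pv_fold_fst_acc (List.range ((b :: c :: t).length - 2))
        (fun v bb => if bb then [(b :: c :: t).getD (v+1) 0, (b :: c :: t).getD v 0, (b :: c :: t).getD (v+2) 0]
                  else [(b :: c :: t).getD v 0, (b :: c :: t).getD (v+1) 0, (b :: c :: t).getD (v+2) 0])
        (fun v bb => if !(check_degenerate ((b :: c :: t).getD v 0) ((b :: c :: t).getD (v+1) 0) ((b :: c :: t).getD (v+2) 0))
                  then !bb else bb)]
  simp

-- A's fold across an END-free prefix: it only accumulates masked indices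
lemma pv_A_noend : ∀ (pre : List Int), (∀ u ∈ pre, PySem.Int.band u 32768 = 0) →
    ∀ (cw : Bool) (cur out : List Int),
    pre.foldl pvAStep (cw, cur, out)
    = ((if cur.length == 0 then pvCW0 pre cw else cw), cur ++ pre.map pvMaskF, out) := by
  intro pre
  induction pre with
  | nil => intro _ cw cur out; by_cases h : cur.length == 0 <;> simp [pvCW0, h]
  | cons u pre ih =>
    intro hfree cw cur out
    have hu : PySem.Int.band u 32768 = 0 := hfree u (by simp)
    have hend : (PySem.Int.band u ((1:Int) <<< (15:Nat)) != 0) = false := by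
      rw [pv_l15, hu]; rfl
    simp only [List.foldl_cons, pvAStep, hend]
    simp only [Bool.false_eq_true, if_false]
    rw [ih (fun v hv => hfree v (by simp [hv])) _ _ _]
    have hne : ((cur ++ [if (PySem.Int.band u ((1:Int) <<< (14:Nat)) != 0) = true
        then PySem.Int.band u (Int.not ((1:Int) <<< (14:Nat))) else u]).length == 0) = false := by
      simp
    rw [hne]
    simp only [Bool.false_eq_true, if_false]
    rw [pv_index_noend u hu]
    simp [pvCW0, pv_l14, pvMaskF]

-- A's trilist accumulator only grows by appending
lemma pv_A_out : ∀ (data : List Int) (cw : Bool) (cur out : List Int),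
    (data.foldl pvAStep (cw, cur, out)).2.2
    = out ++ (data.foldl pvAStep (cw, cur, [])).2.2 := by
  intro data
  induction data with
  | nil => intro cw cur out; simp
  | cons u data ih =>
    intro cw cur out
    simp only [List.foldl_cons]
    by_cases hend : (PySem.Int.band u ((1:Int) <<< (15:Nat)) != 0) = true
    · simp only [pvAStep, hend, if_true]
      rw [ih _ _ _, ih false ([]) (([]) ++ _)]
      simp
    · have hend' : (PySem.Int.band u ((1:Int) <<< (15:Nat)) != 0) = false := by
        simpa using hend
      simp only [pvAStep, hend', Bool.false_eq_true, if_false]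
      exact ih _ _ _

-- A on END-free data returns nothing
lemma pv_A_nil (data : List Int) (hfree : ∀ u ∈ data, PySem.Int.band u 32768 = 0) :
    convert_triangle_strips data = [] := by
  rw [pv_A_eq, pv_A_noend data hfree false [] []]

-- A splits at the first END element
lemma pv_A_split (pre : List Int) (x : Int) (rest : List Int)
    (hfree : ∀ u ∈ pre, PySem.Int.band u 32768 = 0)
    (hx : PySem.Int.band x 32768 ≠ 0) :
    convert_triangle_strips (pre ++ x :: rest)
    = triangle_strip_to_list ((pre ++ [x]).map pvMaskF) (pvCW0 (pre ++ [x]) false)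
      ++ convert_triangle_strips rest := by
  rw [pv_A_eq, pv_A_eq, List.foldl_append, pv_A_noend pre hfree false [] []]
  simp only [List.foldl_cons]
  have hend : (PySem.Int.band x ((1:Int) <<< (15:Nat)) != 0) = true := by
    rw [pv_l15]; simpa [bne_iff_ne] using hx
  simp only [pvAStep, hend, if_true]
  rw [pv_A_out rest false [] _]
  congr 1
  have hidx := pv_index_end x
  have hcw : (if ((([]:List Int) ++ pre.map pvMaskF).length == 0) = true
        then (PySem.Int.band x ((1:Int) <<< (14:Nat)) != 0)
        else (if (([]:List Int).length == 0) = true then pvCW0 pre false else false))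
      = pvCW0 (pre ++ [x]) false := by
    cases pre with
    | nil => simp [pvCW0, pv_l14]
    | cons v pre' => simp [pvCW0]
  simp only [List.nil_append] at hcw ⊢
  rw [hidx, hcw]
  congr 1
  simp [pvMaskF, List.map_append]

-- ---- B-side decode lemmas ----

lemma pv_nd_def (a b c : Int) :
    (if (PySem.Set.ofList [a, b, c]).length == 3 then (1:Int) else 0) = pvNd a b c := rfl

lemma pv_nd_deg (a b c : Int) :
    pvNd a b c = if check_degenerate a b c then 0 else 1 := by
  by_cases h1 : a = b <;> by_cases h2 : a = c <;> by_cases h3 : b = c <;>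
    simp [pvNd, check_degenerate, PySem.Set.ofList, PySem.Set.add, PySem.Set.contains,
      PySem.Set.empty, h1, h2, h3] <;> split_ifs <;> simp_all <;> omega

-- the flips list is the prefix-sum list of pvNd
lemma pv_flips_eq (strip : List Int) : ∀ (n : Nat),
    (List.range n).foldl
      (fun (fl : List Int) v =>
        fl ++ [fl.getLastD 0 +
          (if (PySem.Set.ofList [strip.getD v 0, strip.getD (v+1) 0, strip.getD (v+2) 0]).length == 3
           then (1:Int) else 0)])
      [0]
    = (List.range (n+1)).map (pvNdSum strip) := by
  intro n
  induction n with
  | zero => simp [List.range_one, pvNdSum]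
  | succ n ih =>
    rw [List.range_succ, List.foldl_append, ih]
    simp only [List.foldl_cons, List.foldl_nil]
    rw [show List.range (n+1+1) = List.range (n+1) ++ [n+1] from List.range_succ]
    rw [List.map_append]
    congr 1
    have hlast : ((List.range (n+1)).map (pvNdSum strip)).getLastD 0 = pvNdSum strip n := by
      rw [List.range_succ]
      simp
    rw [hlast, pv_nd_def]
    simp [pvNdSum]

lemma pv_ndsum_shift (a b c : Int) (t : List Int) : ∀ (v : Nat),
    pvNdSum (a :: b :: c :: t) (v+1) = pvNd a b c + pvNdSum (b :: c :: t) v := by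
  intro v
  induction v with
  | zero => simp [pvNdSum]
  | succ v ih =>
    show pvNdSum (a :: b :: c :: t) (v+1) + _ = _
    rw [ih]
    have g1 : (a :: b :: c :: t).getD (v+1) 0 = (b :: c :: t).getD v 0 := List.getD_cons_succ
    have g2 : (a :: b :: c :: t).getD (v+1+1) 0 = (b :: c :: t).getD (v+1) 0 := List.getD_cons_succ
    have g3 : (a :: b :: c :: t).getD (v+1+2) 0 = (b :: c :: t).getD (v+2) 0 := by
      have e : v+1+2 = (v+2)+1 := by omega
      rw [e]; exact List.getD_cons_succ
    show _ = pvNd a b c + (pvNdSum (b :: c :: t) v + _)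
    rw [g1, g2, g3]
    ring

lemma pv_flatMap_range_succ {α : Type} (f : Nat → List α) (n : Nat) :
    (List.range (n+1)).flatMap f = f 0 ++ (List.range n).flatMap (fun v => f (v+1)) := by
  rw [List.range_succ_eq_map, List.flatMap_cons, List.flatMap_map]

-- the zeta-reduced body of pvParityDecode (definitional)
lemma pv_parity_def (strip : List Int) (cw0 : Int) :
    pvParityDecode strip cw0
    = (List.range (strip.length - 2)).flatMap
        (fun v => if PySem.Int.mod (cw0 + ((List.range (strip.length - 2)).foldl
            (fun (fl : List Int) w =>
              fl ++ [fl.getLastD 0 +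
                (if (PySem.Set.ofList [strip.getD w 0, strip.getD (w+1) 0, strip.getD (w+2) 0]).length == 3
                 then (1:Int) else 0)]) [0]).getD v 0) 2 != 0
          then [strip.getD (v+1) 0, strip.getD v 0, strip.getD (v+2) 0]
          else [strip.getD v 0, strip.getD (v+1) 0, strip.getD (v+2) 0]) := rfl

-- one step of B's parity decode
lemma pv_parity_cons (a b c : Int) (t : List Int) (cw0 : Int) :
    pvParityDecode (a :: b :: c :: t) cw0
    = (if PySem.Int.mod cw0 2 != 0 then [b, a, c] else [a, b, c])
      ++ pvParityDecode (b :: c :: t) (cw0 + pvNd a b c) := by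
  have hlen3 : (a :: b :: c :: t).length - 2 = t.length + 1 := by simp
  have hlen2 : (b :: c :: t).length - 2 = t.length := by simp
  rw [pv_parity_def, pv_parity_def]
  rw [hlen3, hlen2, pv_flips_eq, pv_flips_eq]
  rw [pv_flatMap_range_succ]
  have h0 : ((List.range (t.length+1+1)).map (pvNdSum (a :: b :: c :: t))).getD 0 0
      = pvNdSum (a :: b :: c :: t) 0 := PySem.List.getD_map_range _ _ _ _ (by omega)
  congr 1
  · rw [h0]
    show (if PySem.Int.mod (cw0 + pvNdSum (a :: b :: c :: t) 0) 2 != 0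
          then [(a :: b :: c :: t).getD (0+1) 0, (a :: b :: c :: t).getD 0 0, (a :: b :: c :: t).getD (0+2) 0]
          else [(a :: b :: c :: t).getD 0 0, (a :: b :: c :: t).getD (0+1) 0, (a :: b :: c :: t).getD (0+2) 0]) = _
    simp [pvNdSum]
  · apply List.flatMap_congr
    intro v hv
    have hv' : v < t.length := by simpa using hv
    have hb : ((List.range (t.length+1+1)).map (pvNdSum (a :: b :: c :: t))).getD (v+1) 0
        = pvNdSum (a :: b :: c :: t) (v+1) := PySem.List.getD_map_range _ _ _ _ (by omega)
    have hs : ((List.range (t.length+1)).map (pvNdSum (b :: c :: t))).getD v 0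
        = pvNdSum (b :: c :: t) v := PySem.List.getD_map_range _ _ _ _ (by omega)
    have g1 : (a :: b :: c :: t).getD (v+1) 0 = (b :: c :: t).getD v 0 := List.getD_cons_succ
    have g2 : (a :: b :: c :: t).getD (v+1+1) 0 = (b :: c :: t).getD (v+1) 0 := List.getD_cons_succ
    have g3 : (a :: b :: c :: t).getD (v+1+2) 0 = (b :: c :: t).getD (v+2) 0 := by
      have e : v+1+2 = (v+2)+1 := by omega
      rw [e]; exact List.getD_cons_succ
    have hpar : cw0 + pvNdSum (a :: b :: c :: t) (v+1)
        = (cw0 + pvNd a b c) + pvNdSum (b :: c :: t) v := by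
      rw [pv_ndsum_shift]; ring
    simp only [hb, hs, g1, g2, g3, hpar]

-- +1 flips Python parity
lemma pv_mod_flip (x : Int) :
    (PySem.Int.mod (x+1) 2 != 0) = !(PySem.Int.mod x 2 != 0) := by
  rw [show PySem.Int.mod (x+1) 2 = (x+1) % 2 from PySem.Int.mod_eq_emod_of_pos (by norm_num),
      show PySem.Int.mod x 2 = x % 2 from PySem.Int.mod_eq_emod_of_pos (by norm_num)]
  rcases Int.emod_two_eq x with h | h
  · have h2 : (x+1) % 2 = 1 := by omega
    simp [h, h2]
  · have h2 : (x+1) % 2 = 0 := by omega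
    simp [h, h2]

-- B's parity decode is A's toggling decode
lemma pv_parity_eq_tsl : ∀ (n : Nat) (strip : List Int), strip.length ≤ n → ∀ (cw0 : Int),
    pvParityDecode strip cw0
    = triangle_strip_to_list strip (PySem.Int.mod cw0 2 != 0) := by
  intro n
  induction n with
  | zero =>
    intro strip h cw0
    have : strip = [] := List.eq_nil_of_length_eq_zero (by omega)
    subst this; rfl
  | succ n ih =>
    intro strip hlen cw0
    match strip with
    | [] => rfl
    | [a] => rfl
    | [a, b] => rfl
    | a :: b :: c :: t =>
      rw [pv_parity_cons, pv_tsl_cons]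
      congr 1
      rw [ih (b :: c :: t) (by simp at hlen ⊢; omega) (cw0 + pvNd a b c)]
      congr 1
      by_cases hdeg : check_degenerate a b c = true
      · rw [pv_nd_deg, if_pos hdeg]
        simp [hdeg]
      · have hdeg' : check_degenerate a b c = false := by simpa using hdeg
        rw [pv_nd_deg, if_neg (by simp [hdeg'])]
        rw [pv_mod_flip]
        simp [hdeg']

-- ---- B-side boundary lemmas ----

lemma pv_alt_eq (data : List Int) :
    convert_triangle_strips_alt data
    = ((pvStarts data).zip (pvEnds data)).flatMap (pvDec data) := by
  unfold convert_triangle_strips_alt pvStarts pvEnds pvDec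
  rw [PySem.List.foldl_append_eq_flatMap]
  rfl

lemma pv_ends_shift : ∀ (t : List Int) (s : Int),
    ((PySem.List.enumerate t s).filter (fun p => PySem.Int.band p.2 32768 != 0)).map (·.1)
    = (((PySem.List.enumerate t 0).filter (fun p => PySem.Int.band p.2 32768 != 0)).map (·.1)).map (· + s) := by
  intro t
  induction t with
  | nil => intro s; simp [PySem.List.enumerate]
  | cons u t ih =>
    intro s
    rw [PySem.List.enumerate_cons, PySem.List.enumerate_cons]
    by_cases hp : (PySem.Int.band u 32768 != 0) = true
    · simp only [List.filter_cons, hp, if_true, List.map_cons, zero_add]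
      rw [ih (s+1), ih 1]
      have hf : ∀ y : Int, y + 1 + s = y + (s + 1) := by intro y; ring
      simp [List.map_map, Function.comp, hf]
    · have hp' : (PySem.Int.band u 32768 != 0) = false := by simpa using hp
      simp only [List.filter_cons, hp', Bool.false_eq_true, if_false, zero_add]
      rw [ih (s+1), ih 1]
      have hf : ∀ y : Int, y + 1 + s = y + (s + 1) := by intro y; ring
      simp [List.map_map, Function.comp, hf]

lemma pv_ends_nil (data : List Int) (hfree : ∀ u ∈ data, PySem.Int.band u 32768 = 0) :
    pvEnds data = [] := by
  unfold pvEnds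
  rw [List.filter_eq_nil_iff.mpr, List.map_nil]
  intro p hp
  obtain ⟨k, hk, rfl⟩ := (PySem.List.mem_enumerate_iff _ _ _).mp hp
  simp [hfree _ (List.getElem_mem hk)]

lemma pv_ends_split (pre : List Int) (x : Int) (rest : List Int)
    (hfree : ∀ u ∈ pre, PySem.Int.band u 32768 = 0)
    (hx : PySem.Int.band x 32768 ≠ 0) :
    pvEnds (pre ++ x :: rest)
    = (pre.length : Int) :: (pvEnds rest).map (· + ((pre.length : Int) + 1)) := by
  unfold pvEnds
  rw [PySem.List.enumerate_append, List.filter_append, List.map_append]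
  rw [List.filter_eq_nil_iff.mpr (by
    intro p hp
    obtain ⟨k, hk, rfl⟩ := (PySem.List.mem_enumerate_iff _ _ _).mp hp
    simp [hfree _ (List.getElem_mem hk)])]
  rw [PySem.List.enumerate_cons]
  have hxp : (PySem.Int.band x 32768 != 0) = true := by simpa [bne_iff_ne] using hx
  simp only [List.filter_cons, hxp, if_true, List.map_cons, List.nil_append]
  simp only [zero_add]
  rw [pv_ends_shift rest ((pre.length : Int) + 1)]
  simp

lemma pv_ends_nonneg (data : List Int) : ∀ e ∈ pvEnds data, 0 ≤ e := by
  intro e he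
  unfold pvEnds at he
  obtain ⟨p, hp, rfl⟩ := List.mem_map.mp he
  obtain ⟨k, hk, rfl⟩ := (PySem.List.mem_enumerate_iff _ _ _).mp (List.mem_of_mem_filter hp)
  simp

lemma pv_starts_nonneg (data : List Int) : ∀ s ∈ pvStarts data, 0 ≤ s := by
  intro s hs
  unfold pvStarts at hs
  rcases List.mem_cons.mp hs with rfl | hs
  · norm_num
  · obtain ⟨e, he, rfl⟩ := List.mem_map.mp hs
    have := pv_ends_nonneg data e ((List.dropLast_sublist _).subset he)
    omega

-- decoding a strip of the suffix through shifted global indices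
lemma pv_dec_shift (pre2 rest : List Int) (a b : Int) (ha : 0 ≤ a) (hb : 0 ≤ b) :
    pvDec (pre2 ++ rest) (a + (pre2.length : Int), b + (pre2.length : Int)) = pvDec rest (a, b) := by
  unfold pvDec
  have hget : PySem.List.pyGetD (pre2 ++ rest) (a + (pre2.length : Int)) 0
      = PySem.List.pyGetD rest a 0 := by
    rw [PySem.List.pyGetD_of_nonneg _ _ (by omega), PySem.List.pyGetD_of_nonneg _ _ ha]
    have ht : (a + (pre2.length : Int)).toNat = pre2.length + a.toNat := by omega
    rw [ht]
    rw [List.getD_eq_getElem?_getD, List.getD_eq_getElem?_getD]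
    rw [List.getElem?_append_right (by omega)]
    simp
  have hslice : PySem.List.slice (pre2 ++ rest) (some (a + (pre2.length : Int)))
      (some (b + (pre2.length : Int) + 1))
      = PySem.List.slice rest (some a) (some (b + 1)) := by
    rw [PySem.List.slice_toNat _ (by omega) (by omega), PySem.List.slice_toNat _ ha (by omega)]
    have h1 : (a + (pre2.length : Int)).toNat = pre2.length + a.toNat := by omega
    have h2 : (b + (pre2.length : Int) + 1).toNat - (a + (pre2.length : Int)).toNat
        = (b+1).toNat - a.toNat := by omega
    rw [h2, h1, List.drop_length_add_append]
  rw [hget, hslice]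

lemma pv_alt_nil (data : List Int) (hfree : ∀ u ∈ data, PySem.Int.band u 32768 = 0) :
    convert_triangle_strips_alt data = [] := by
  rw [pv_alt_eq, pv_ends_nil data hfree]
  simp

-- B splits at the first END element
lemma pv_alt_split (pre : List Int) (x : Int) (rest : List Int)
    (hfree : ∀ u ∈ pre, PySem.Int.band u 32768 = 0)
    (hx : PySem.Int.band x 32768 ≠ 0) :
    convert_triangle_strips_alt (pre ++ x :: rest)
    = pvDec (pre ++ x :: rest) (0, (pre.length : Int)) ++ convert_triangle_strips_alt rest := by
  rw [pv_alt_eq, pv_alt_eq, pv_ends_split pre x rest hfree hx]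
  set L : Int := (pre.length : Int) with hL
  set K : Int := L + 1 with hK
  have hlen2 : ((pre ++ [x]).length : Int) = K := by simp [hK, hL]
  have hshift : ∀ p ∈ (pvStarts rest).zip (pvEnds rest),
      pvDec (pre ++ x :: rest) (p.1 + K, p.2 + K) = pvDec rest p := by
    intro p hp
    have hmem := List.of_mem_zip hp
    have h1 : 0 ≤ p.1 := pv_starts_nonneg rest p.1 hmem.1
    have h2 : 0 ≤ p.2 := pv_ends_nonneg rest p.2 hmem.2
    have e : pre ++ x :: rest = (pre ++ [x]) ++ rest := by simp
    rw [e, ← hlen2]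
    exact pv_dec_shift (pre ++ [x]) rest p.1 p.2 h1 h2
  cases hM : pvEnds rest with
  | nil =>
    simp only [pvStarts, hM, List.map_nil, List.dropLast_nil]
    simp [List.zip_nil_right, pv_ends_split pre x rest hfree hx, hM]
  | cons m M' =>
    have hstarts : pvStarts (pre ++ x :: rest) = 0 :: (pvStarts rest).map (· + K) := by
      unfold pvStarts
      rw [pv_ends_split pre x rest hfree hx, hM]
      have hf : ∀ y : Int, y + (L + 1) + 1 = y + 1 + (L + 1) := by intro y; ring
      simp [List.map_dropLast, List.map_map, hK, hL]
      ring_nf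
    rw [hM] at hshift
    rw [hstarts]
    rw [List.zip_cons_cons, List.flatMap_cons]
    refine congrArg (fun z => pvDec (pre ++ x :: rest) (0, L) ++ z) ?_
    rw [List.zip_map, List.flatMap_map]
    apply List.flatMap_congr
    intro p hp
    simpa [Prod.map] using hshift p hp

-- ---- head-strip equality and main induction ----

lemma pv_getD_head (pre : List Int) (x : Int) (rest : List Int) :
    (pre ++ x :: rest).getD 0 0 = (pre ++ [x]).getD 0 0 := by
  cases pre <;> rfl

lemma pv_cw0_head (l : List Int) (h : l ≠ []) (cw : Bool) :
    pvCW0 l cw = (PySem.Int.band (l.getD 0 0) 16384 != 0) := by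
  cases l with
  | nil => exact absurd rfl h
  | cons u t => rfl

lemma pv_head_dec (pre : List Int) (x : Int) (rest : List Int) :
    pvDec (pre ++ x :: rest) (0, (pre.length : Int))
    = triangle_strip_to_list ((pre ++ [x]).map pvMaskF) (pvCW0 (pre ++ [x]) false) := by
  unfold pvDec
  have hslice : PySem.List.slice (pre ++ x :: rest) (some 0) (some ((pre.length : Int) + 1))
      = pre ++ [x] := by
    rw [PySem.List.slice_toNat _ (by norm_num) (by omega)]
    have h1 : ((pre.length : Int) + 1).toNat - (0:Int).toNat = pre.length + 1 := by omega
    rw [h1]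
    simp only [Int.toNat_zero, List.drop_zero]
    rw [show pre.length + 1 = pre.length + 1 from rfl]
    have := List.take_length_add_append (i := 1) (l₁ := pre) (l₂ := x :: rest)
    simpa using this
  have hget : PySem.List.pyGetD (pre ++ x :: rest) 0 0 = (pre ++ [x]).getD 0 0 := by
    rw [PySem.List.pyGetD_of_nonneg _ _ (by norm_num)]
    simpa using pv_getD_head pre x rest
  rw [hslice, hget]
  show pvParityDecode ((pre ++ [x]).map pvMaskF)
      (if (PySem.Int.band ((pre ++ [x]).getD 0 0) 16384 != 0) = true then 1 else 0) = _
  rw [pv_parity_eq_tsl ((pre ++ [x]).map pvMaskF).length _ le_rfl]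
  congr 1
  rw [pv_cw0_head (pre ++ [x]) (by simp) false]
  cases hb : (PySem.Int.band ((pre ++ [x]).getD 0 0) 16384 != 0) <;> decide

lemma pv_main : ∀ (n : Nat) (data : List Int), data.length ≤ n →
    convert_triangle_strips data = convert_triangle_strips_alt data := by
  intro n
  induction n with
  | zero =>
    intro data h
    have : data = [] := List.eq_nil_of_length_eq_zero (by omega)
    subst this; rfl
  | succ n ih =>
    intro data hlen
    by_cases hA : data.any (fun u => PySem.Int.band u 32768 != 0)
    · have hidx : data.findIdx (fun u => PySem.Int.band u 32768 != 0) < data.length :=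
        List.findIdx_lt_length.mpr (by simpa using hA)
      have hx0 := List.findIdx_getElem (p := fun u => PySem.Int.band u 32768 != 0)
        (xs := data) (w := hidx)
      set e := data.findIdx (fun u => PySem.Int.band u 32768 != 0) with he
      have hx : (PySem.Int.band data[e] 32768 != 0) = true := hx0
      have hxne : PySem.Int.band data[e] 32768 ≠ 0 := by simpa [bne_iff_ne] using hx
      have hfree : ∀ u ∈ data.take e, PySem.Int.band u 32768 = 0 := by
        intro u hu
        obtain ⟨i, hi, hgu⟩ := List.getElem_of_mem hu
        have hie : i < e := by
          have := hi
          simp [List.length_take] at this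
          omega
        have hget : (data.take e)[i] = data[i]'(by omega) := List.getElem_take
        have hie' : i < data.findIdx (fun u => PySem.Int.band u 32768 != 0) := by
          rw [← he]; exact hie
        have hnp := List.not_of_lt_findIdx hie'
        rw [← hgu, hget]
        simpa [bne_iff_ne] using hnp
      have hdecomp : data = data.take e ++ data[e] :: data.drop (e+1) := by
        conv_lhs => rw [← List.take_append_drop e data]
        rw [← List.getElem_cons_drop hidx]
      have hrest : (data.drop (e+1)).length ≤ n := by
        have hld : (data.drop (e+1)).length = data.length - (e+1) := by simp
        omega
      conv_lhs => rw [hdecomp]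
      conv_rhs => rw [hdecomp]
      rw [pv_A_split _ _ _ hfree hxne, pv_alt_split _ _ _ hfree hxne,
          pv_head_dec _ _ _, ih _ hrest]
    · have hfree : ∀ u ∈ data, PySem.Int.band u 32768 = 0 := by
        intro u hu
        by_contra hne
        exact hA (List.any_eq_true.mpr ⟨u, hu, by simpa [bne_iff_ne] using hne⟩)
      rw [pv_A_nil data hfree, pv_alt_nil data hfree]

-- ===== VERDICT (by name: the statement is the Claim_ definition above) =====
theorem convert_triangle_strips_spec : Claim_equal_convert_triangle_strips := by
  intro data _
  unfold Spec_convert_triangle_strips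
  exact pv_main data.length data le_rfl
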